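-- pv_equiv track=rewrite | github.com/dima-pv/codewar | codewar/Who likes it.py | likes2
-- ===== SOURCE A (Python) =====
-- def likes2(names):
--     textToReturn = ""
--
--     if (len(names) == 0):
--         textToReturn = "no one likes this"
--     elif (len(names) == 1):
--         textToReturn = str(names[0]) + " likes this"
--     elif (len(names) > 1 and len(names) < 4):
--         for name in range(0, len(names) - 1):
--             textToReturn = textToReturn + names[name] + ", "
--         textToReturn = textToReturn[:-2]
--         textToReturn = textToReturn + " and " + str(names[len(names) - 1]) + " like this"
--     else:
--         for name in range(0, 2):
--             textToReturn = textToReturn + names[name] + ", "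
--         textToReturn = textToReturn[:-2]
--         textToReturn = textToReturn + " and " + str(len(names)-2) + " others like this"
--     return textToReturn
-- ===== SOURCE B (Python) =====
-- def likes2(names):
--     n = len(names)
--     if n == 0:
--         return "no one likes this"
--     if n == 1:
--         return str(names[0]) + " likes this"
--     if n == 2:
--         return names[0] + " and " + str(names[1]) + " like this"
--     if n == 3:
--         return names[0] + ", " + names[1] + " and " + str(names[2]) + " like this"
--     return names[0] + ", " + names[1] + " and " + str(n - 2) + " others like this"
-- ===== Notes on version B (the rewrite author's own statement) =====
-- stated objective: simpler
-- what changed: Replaces A's accumulator loops over ranges plus the [:-2] slice trim with direct per-length returns (n==0/1/2/3/else), each built in one expression with no loop, slice or mutable accumulator.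
import Mathlib
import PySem

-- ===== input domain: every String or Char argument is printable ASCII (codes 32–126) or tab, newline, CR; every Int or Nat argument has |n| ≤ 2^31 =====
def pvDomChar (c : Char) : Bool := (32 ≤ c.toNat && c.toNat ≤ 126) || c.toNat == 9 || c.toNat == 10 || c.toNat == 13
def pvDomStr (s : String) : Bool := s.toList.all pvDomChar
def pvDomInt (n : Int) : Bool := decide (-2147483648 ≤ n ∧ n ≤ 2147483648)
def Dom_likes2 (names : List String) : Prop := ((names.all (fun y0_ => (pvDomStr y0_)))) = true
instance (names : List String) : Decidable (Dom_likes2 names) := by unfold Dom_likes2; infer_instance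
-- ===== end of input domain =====

-- B replaces A's accumulator loops and [:-2] slice trim with direct per-length returns; objective: simpler.

-- ===== PORT A =====
-- literal transliteration of A: if-chain on len, range loops folded over an accumulator,
-- a [:-2] slice trim, indexing via pyGet? (always in range here, so getD "" is never the default)
def likes2 (names : List String) : String :=
  if names.length == 0 then "no one likes this"
  else if names.length == 1 then
    ((PySem.List.pyGet? names (0 : Int)).getD "") ++ " likes this"
  else if names.length > 1 && names.length < 4 then
    let t := (PySem.List.pyRange 0 ((names.length : Int) - 1) 1).foldl
      (fun acc i => acc ++ (PySem.List.pyGet? names i).getD "" ++ ", ") ""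
    let t := PySem.Str.slice t none (some (-2))
    t ++ " and " ++ (PySem.List.pyGet? names ((names.length : Int) - 1)).getD "" ++ " like this"
  else
    let t := (PySem.List.pyRange 0 2 1).foldl
      (fun acc i => acc ++ (PySem.List.pyGet? names i).getD "" ++ ", ") ""
    let t := PySem.Str.slice t none (some (-2))
    t ++ " and " ++ PySem.Int.toStr ((names.length : Int) - 2) ++ " others like this"

-- ===== PORT B =====
def likes2_alt (names : List String) : String :=
  match names with
  | [] => "no one likes this"
  | [a] => a ++ " likes this"
  | [a, b] => a ++ " and " ++ b ++ " like this"
  | [a, b, c] => a ++ ", " ++ b ++ " and " ++ c ++ " like this"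
  | a :: b :: rest => a ++ ", " ++ b ++ " and " ++ PySem.Int.toStr ((rest.length : Int)) ++ " others like this"

-- ===== PRECONDITION & SPEC =====
def Spec_likes2 (names : List String) (out : String) : Prop := out = likes2_alt names
instance (names : List String) (out : String) : Decidable (Spec_likes2 names out) := by unfold Spec_likes2; infer_instance

-- ===== CLAIM (what is proved, stated in full; the proofs are below) =====
def Claim_equal_likes2 : Prop := ∀ (names : List String), Dom_likes2 names → Spec_likes2 names (likes2 names)

-- ===== LEMMAS AND PROOFS =====

-- the [:-2] trim of an accumulator that ends in ", " just drops that trailing ", "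
theorem trim_comma1 (a : String) :
    PySem.Str.slice (a ++ ", ") none (some (-2)) = a := by
  apply String.ext
  simp [PySem.Str.slice, PySem.List.slice_to_neg_ofNat _ 2 (by omega)]

theorem list_trim2 (xs ys : List Char) :
    List.take (xs.length + (ys.length + 2 + 1 + 1) - 2) (xs ++ ',' :: ' ' :: (ys ++ [',', ' '])) =
      xs ++ ',' :: ' ' :: ys := by
  rw [List.take_append, List.take_of_length_le (by omega)]
  congr 1
  have h : xs.length + (ys.length + 2 + 1 + 1) - 2 - xs.length = ys.length + 2 := by omega
  rw [h]
  simp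

theorem trim_comma2 (a b : String) :
    PySem.Str.slice (a ++ (", " ++ (b ++ ", "))) none (some (-2)) = a ++ (", " ++ b) := by
  apply String.ext
  simp [PySem.Str.slice, PySem.List.slice_to_neg_ofNat _ 2 (by omega)]
  simpa using list_trim2 a.toList b.toList

-- ===== VERDICT (by name: the statement is the Claim_ definition above) =====
theorem likes2_spec : Claim_equal_likes2 := by
  intro names _
  unfold Spec_likes2 likes2 likes2_alt
  match names with
  | [] => rfl
  | [a] => simp [PySem.List.pyGet?, PySem.List.pyIdx?]
  | [a, b] =>
    have h1 : PySem.List.pyRange 0 1 1 = [0] := by decide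
    simp [h1, PySem.List.pyGet?, PySem.List.pyIdx?, trim_comma1]
  | [a, b, c] =>
    have h1 : PySem.List.pyRange 0 2 1 = [0, 1] := by decide
    simp [h1, PySem.List.pyGet?, PySem.List.pyIdx?, trim_comma2, String.append_assoc]
  | a :: b :: c :: d :: rest =>
    have h0 : ¬ (rest.length + 1 + 1 + 1 + 1 < 4) := by omega
    have h1 : PySem.List.pyRange 0 2 1 = [0, 1] := by decide
    have hp : (0:Int) ≤ (rest.length : Int) + 1 + 1 + 1 := by positivity
    have hp2 : (0:Int) ≤ (rest.length : Int) + 1 + 1 := by positivity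
    have h2 : ((rest.length : Int)) + 1 + 1 + 1 + 1 - 2 = ((rest.length : Int)) + 1 + 1 := by ring
    simp [h0, h1, hp, hp2, h2, PySem.List.pyGet?, PySem.List.pyIdx?, trim_comma2,
      String.append_assoc]
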